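-- pv_equiv track=rewrite | github.com/ElizandroSchramm/agent-gerador-de-video | tools/generate_storyboard.py | extract_beats
-- ===== SOURCE A (Python) =====
-- def extract_beats(text, max_beats=6):
--     lines = [l.strip() for l in text.splitlines() if l.strip()]
--     beats, buf = [], []
--     for ln in lines:
--         if ln.startswith("[") and ln.endswith("]"):
--             if buf: beats.append(" ".join(buf)); buf = []
--         else:
--             buf.append(ln)
--     if buf: beats.append(" ".join(buf))
--     if len(beats) > max_beats:
--         beats = beats[:max_beats-1] + ["Resumo visual do CTA"]
--     return beats[:max_beats]
-- ===== SOURCE B (Python) =====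
-- def _is_marker(ln):
--     return ln.startswith("[") and ln.endswith("]")
--
-- def _beats(lines):
--     # recursive run-partitioning: skip markers, take each maximal non-marker run as one beat
--     if not lines:
--         return []
--     if _is_marker(lines[0]):
--         return _beats(lines[1:])
--     i = 1
--     while i < len(lines) and not _is_marker(lines[i]):
--         i += 1
--     return [" ".join(lines[:i])] + _beats(lines[i:])
--
-- def extract_beats(text, max_beats=6):
--     lines = [l.strip() for l in text.splitlines() if l.strip()]
--     beats = _beats(lines)
--     if len(beats) > max_beats:
--         beats = beats[:max_beats-1] + ["Resumo visual do CTA"]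
--     return beats[:max_beats]
-- ===== Notes on version B (the rewrite author's own statement) =====
-- stated objective: alternative
-- what changed: Replaces A's mutable buffer with flush-on-marker-and-at-end loop by a recursive run-partition of the cleaned line list: skip marker lines, take each maximal non-marker run and join it into one beat; the cap logic is unchanged.
import Mathlib
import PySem

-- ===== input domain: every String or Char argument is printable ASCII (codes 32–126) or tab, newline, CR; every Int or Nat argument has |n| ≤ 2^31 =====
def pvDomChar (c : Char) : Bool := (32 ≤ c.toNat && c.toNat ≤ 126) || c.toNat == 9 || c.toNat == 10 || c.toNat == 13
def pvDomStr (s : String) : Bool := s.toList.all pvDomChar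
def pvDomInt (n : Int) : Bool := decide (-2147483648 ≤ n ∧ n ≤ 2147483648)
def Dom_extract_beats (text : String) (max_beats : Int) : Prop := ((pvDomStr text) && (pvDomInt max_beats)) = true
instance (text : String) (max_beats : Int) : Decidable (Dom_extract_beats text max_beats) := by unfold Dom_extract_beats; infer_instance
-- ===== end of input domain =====

-- B replaces A's mutable buffer/flush loop by recursive run-partitioning over the same cleaned line list (objective: alternative decomposition).


-- ===== PORT A =====
-- [l.strip() for l in text.splitlines() if l.strip()]
def pvLines (text : String) : List String :=
  (PySem.Str.splitlines text).filterMap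
    (fun l => let s := PySem.Str.strip l; if s ≠ "" then some s else none)

def pvMarker (ln : String) : Bool :=
  PySem.Str.startswith ln "[" && PySem.Str.endswith ln "]"

def extract_beats (text : String) (max_beats : Int) : List String :=
  let lines := pvLines text
  let st := lines.foldl
    (fun (st : List String × List String) ln =>
      if pvMarker ln then
        if st.2 ≠ [] then (st.1 ++ [PySem.Str.join " " st.2], []) else st
      else (st.1, st.2 ++ [ln]))
    ([], [])
  let beats := if st.2 ≠ [] then st.1 ++ [PySem.Str.join " " st.2] else st.1
  let beats :=
    if (beats.length : Int) > max_beats then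
      PySem.List.slice beats none (some (max_beats - 1)) ++ ["Resumo visual do CTA"]
    else beats
  PySem.List.slice beats none (some max_beats)

-- ===== PORT B =====
def pvBeats : List String → List String
  | [] => []
  | ln :: rest =>
    if pvMarker ln then pvBeats rest
    else
      PySem.Str.join " " (ln :: rest.takeWhile (fun l => !pvMarker l)) ::
        pvBeats (rest.dropWhile (fun l => !pvMarker l))
termination_by ls => ls.length
decreasing_by
  · simp
  · have := List.length_dropWhile_le (p := fun l => !pvMarker l) (l := rest)
    simp; omega

def extract_beats_alt (text : String) (max_beats : Int) : List String :=
  let beats := pvBeats (pvLines text)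
  let beats :=
    if (beats.length : Int) > max_beats then
      PySem.List.slice beats none (some (max_beats - 1)) ++ ["Resumo visual do CTA"]
    else beats
  PySem.List.slice beats none (some max_beats)

-- ===== PRECONDITION & SPEC =====
def Spec_extract_beats (text : String) (max_beats : Int) (out : List String) : Prop := out = extract_beats_alt text max_beats
instance (text : String) (max_beats : Int) (out : List String) : Decidable (Spec_extract_beats text max_beats out) := by unfold Spec_extract_beats; infer_instance

-- ===== CLAIM (what is proved, stated in full; the proofs are below) =====
def Claim_equal_extract_beats : Prop := ∀ (text : String) (max_beats : Int), Dom_extract_beats text max_beats → Spec_extract_beats text max_beats (extract_beats text max_beats)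

-- ===== LEMMAS AND PROOFS =====
-- proof-side names for A's loop body and final flush
def pvStepA (st : List String × List String) (ln : String) : List String × List String :=
  if pvMarker ln then
    if st.2 ≠ [] then (st.1 ++ [PySem.Str.join " " st.2], []) else st
  else (st.1, st.2 ++ [ln])

def pvFinA (st : List String × List String) : List String :=
  if st.2 ≠ [] then st.1 ++ [PySem.Str.join " " st.2] else st.1

-- A's loop with initial accumulator (beats, buf), finally flushed, is beats ++ the
-- run-partition beats of ls (with buf the pending prefix of the current run).
theorem pvLoop_eq (ls : List String) : ∀ (beats buf : List String),
    pvFinA (ls.foldl pvStepA (beats, buf))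
    = beats ++ (if buf = [] then pvBeats ls
        else PySem.Str.join " " (buf ++ ls.takeWhile (fun l => !pvMarker l)) ::
              pvBeats (ls.dropWhile (fun l => !pvMarker l))) := by
  induction ls with
  | nil =>
    intro beats buf
    by_cases h : buf = [] <;> simp [h, pvBeats, pvFinA]
  | cons ln rest ih =>
    intro beats buf
    rw [List.foldl_cons]
    by_cases hm : pvMarker ln
    · by_cases h : buf = []
      · rw [show pvStepA (beats, buf) ln = (beats, buf) by simp [pvStepA, hm, h], ih]
        simp [h, pvBeats, hm]
      · rw [show pvStepA (beats, buf) ln = (beats ++ [PySem.Str.join " " buf], []) by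
            simp [pvStepA, hm, h], ih]
        simp [h, pvBeats, hm]
    · rw [show pvStepA (beats, buf) ln = (beats, buf ++ [ln]) by simp [pvStepA, hm], ih]
      by_cases h : buf = [] <;>
        simp [h, pvBeats, hm]

-- ===== VERDICT (by name: the statement is the Claim_ definition above) =====
theorem extract_beats_spec : Claim_equal_extract_beats := by
  intro text max_beats _
  unfold Spec_extract_beats extract_beats extract_beats_alt
  simp only []
  rw [show (fun (st : List String × List String) (ln : String) =>
        if pvMarker ln then
          if st.2 ≠ [] then (st.1 ++ [PySem.Str.join " " st.2], []) else st
        else (st.1, st.2 ++ [ln])) = pvStepA from rfl]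
  have h := pvLoop_eq (pvLines text) [] []
  simp only [pvFinA, List.nil_append, if_pos] at h
  rw [h]
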